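-- pv_equiv track=rewrite | github.com/miliar/Code_Jam_Webscraper | solutions_python/Problem_96/1497.py | getMaxMark
-- ===== SOURCE A (Python) =====
-- def getMaxMark(overall):
--     marks = range(11)
--     results = []
--     for x in marks:
--         for y in marks:
--             for z in marks:
--                 if(
--                     (x + y + z == overall) and
--                     max(abs(x - y), abs(y - z), abs(z-x)) < 2
--                 ):
--                     results.append(max(x, y, z))
--     if results:
--         return max(results)
-- ===== SOURCE B (Python) =====
-- def getMaxMark(overall):
--     # Closed form: a feasible triple exists iff 0 <= overall <= 30, and the
--     # best triple uses values in {overall//3, overall//3 + 1}, so the answer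
--     # is ceil(overall/3).
--     if 0 <= overall <= 30:
--         return -(-overall // 3)
-- ===== Notes on version B (the rewrite author's own statement) =====
-- stated objective: simpler
-- what changed: Replaces the 11x11x11 brute-force triple scan with a closed form: the answer is ceil(overall/3) when 0 <= overall <= 30, else None.
import Mathlib
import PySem

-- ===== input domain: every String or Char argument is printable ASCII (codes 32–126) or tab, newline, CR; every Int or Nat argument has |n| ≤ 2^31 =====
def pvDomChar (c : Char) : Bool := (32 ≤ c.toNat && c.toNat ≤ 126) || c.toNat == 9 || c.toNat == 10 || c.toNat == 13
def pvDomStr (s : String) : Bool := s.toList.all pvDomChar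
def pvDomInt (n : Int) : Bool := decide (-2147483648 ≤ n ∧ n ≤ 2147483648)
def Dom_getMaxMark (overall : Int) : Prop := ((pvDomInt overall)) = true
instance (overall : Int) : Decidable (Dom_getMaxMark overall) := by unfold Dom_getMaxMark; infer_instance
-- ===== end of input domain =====

set_option maxRecDepth 8000


-- B replaces A's 11^3 brute-force scan by the closed form ceil(overall/3) guarded by 0 ≤ overall ≤ 30 (objective: simpler).

-- ===== PORT A =====
def getMaxMark (overall : Int) : Option Int :=
  let marks := PySem.List.pyRange 0 11 1
  let results : List Int := marks.foldl (fun acc x =>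
    marks.foldl (fun acc y =>
      marks.foldl (fun acc z =>
        if x + y + z = overall ∧ max (|x - y|) (max (|y - z|) (|z - x|)) < 2
        then acc ++ [max x (max y z)] else acc) acc) acc) []
  if results ≠ [] then PySem.List.max? results (fun v => v) else none

-- ===== PORT B =====
def getMaxMark_alt (overall : Int) : Option Int :=
  if 0 ≤ overall ∧ overall ≤ 30 then some (-(PySem.Int.floordiv (-overall) 3)) else none

-- ===== PRECONDITION & SPEC =====
def Spec_getMaxMark (overall : Int) (out : Option Int) : Prop := out = getMaxMark_alt overall
instance (overall : Int) (out : Option Int) : Decidable (Spec_getMaxMark overall out) := by unfold Spec_getMaxMark; infer_instance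

-- ===== CLAIM (what is proved, stated in full; the proofs are below) =====
def Claim_equal_getMaxMark : Prop := ∀ (overall : Int), Dom_getMaxMark overall → Spec_getMaxMark overall (getMaxMark overall)

-- ===== LEMMAS AND PROOFS =====

theorem foldl_id {α β : Type} (l : List α) (acc : β) :
    l.foldl (fun acc _ => acc) acc = acc := by
  induction l generalizing acc with
  | nil => rfl
  | cons a t ih => exact ih acc

-- Outside 0..30 no triple of marks sums to overall, so A's results list stays empty.
theorem results_nil (overall : Int) (h : ¬ (0 ≤ overall ∧ overall ≤ 30)) :
    (PySem.List.pyRange 0 11 1).foldl (fun acc x =>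
      (PySem.List.pyRange 0 11 1).foldl (fun acc y =>
        (PySem.List.pyRange 0 11 1).foldl (fun acc z =>
          if x + y + z = overall ∧ max (|x - y|) (max (|y - z|) (|z - x|)) < 2
          then acc ++ [max x (max y z)] else acc) acc) acc) ([] : List Int) = [] := by
  rw [PySem.List.foldl_congr_mem (g := fun acc _ => acc), foldl_id]
  intro acc x hx
  rw [PySem.List.foldl_congr_mem (g := fun acc _ => acc), foldl_id]
  intro acc y hy
  rw [PySem.List.foldl_congr_mem (g := fun acc _ => acc), foldl_id]
  intro acc z hz
  rw [PySem.List.mem_pyRange_one] at hx hy hz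
  rw [if_neg]
  rintro ⟨hsum, -⟩
  omega

-- ===== VERDICT (by name: the statement is the Claim_ definition above) =====
theorem getMaxMark_spec : Claim_equal_getMaxMark := by
  intro overall _
  unfold Spec_getMaxMark
  by_cases h : 0 ≤ overall ∧ overall ≤ 30
  · obtain ⟨h1, h2⟩ := h
    interval_cases overall <;> decide
  · show getMaxMark overall = _
    unfold getMaxMark getMaxMark_alt
    simp only [results_nil overall h, if_neg h]
    simp
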